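-- pv_equiv track=rewrite | github.com/yun-dam/scan2therm | main.py | normalize_material_category
-- ===== SOURCE A (Python) =====
-- def normalize_material_category(raw: str | None) -> str:
--     if not raw:
--         return "Unknown"
--     r = raw.strip().lower()
--     if any(k in r for k in ["wood", "wooden", "timber", "bamboo"]):
--         return "Wood"
--     if any(k in r for k in ["concrete", "cement"]):
--         return "Concrete"
--     if "glass" in r:
--         return "Glass"
--     if any(k in r for k in ["metal", "steel", "iron", "aluminum", "aluminium", "brass"]):
--         return "Metal"
--     if any(k in r for k in ["plastic", "acrylic", "vinyl"]):
--         return "Plastic"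
--     if any(k in r for k in ["fabric", "textile", "cloth", "leather"]):
--         return "Textile"
--     if any(k in r for k in ["ceramic", "tile", "porcelain"]):
--         return "Ceramic/Tile"
--     if any(k in r for k in ["stone", "marble", "granite"]):
--         return "Stone"
--     if any(k in r for k in ["paper", "cardboard"]):
--         return "Paper"
--     return "Other"
-- ===== SOURCE B (Python) =====
-- _KEYWORDS = {
--     "wood": (0, "Wood"), "wooden": (0, "Wood"), "timber": (0, "Wood"), "bamboo": (0, "Wood"),
--     "concrete": (1, "Concrete"), "cement": (1, "Concrete"),
--     "glass": (2, "Glass"),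
--     "metal": (3, "Metal"), "steel": (3, "Metal"), "iron": (3, "Metal"),
--     "aluminum": (3, "Metal"), "aluminium": (3, "Metal"), "brass": (3, "Metal"),
--     "plastic": (4, "Plastic"), "acrylic": (4, "Plastic"), "vinyl": (4, "Plastic"),
--     "fabric": (5, "Textile"), "textile": (5, "Textile"), "cloth": (5, "Textile"), "leather": (5, "Textile"),
--     "ceramic": (6, "Ceramic/Tile"), "tile": (6, "Ceramic/Tile"), "porcelain": (6, "Ceramic/Tile"),
--     "stone": (7, "Stone"), "marble": (7, "Stone"), "granite": (7, "Stone"),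
--     "paper": (8, "Paper"), "cardboard": (8, "Paper"),
-- }
--
-- _LENS = [4, 5, 6, 7, 8, 9]  # the distinct keyword lengths
--
--
-- def normalize_material_category(raw):
--     # Single sliding-window scan: at every position look up each window of a
--     # possible keyword length in the flat keyword table, keep the minimum-priority hit.
--     if not raw:
--         return "Unknown"
--     r = raw.strip().lower()
--     best = None
--     for i in range(len(r)):
--         for L in _LENS:
--             hit = _KEYWORDS.get(r[i:i + L])
--             if hit is not None and (best is None or hit[0] < best[0]):
--                 best = hit
--     return best[1] if best is not None else "Other"
-- ===== Notes on version B (the rewrite author's own statement) =====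
-- stated objective: alternative
-- what changed: Replaced the ordered chain of per-keyword substring searches by a single sliding-window scan: each window of a possible keyword length is looked up in one flat keyword->(priority,category) dictionary and the minimum-priority hit decides the category.
import Mathlib
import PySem

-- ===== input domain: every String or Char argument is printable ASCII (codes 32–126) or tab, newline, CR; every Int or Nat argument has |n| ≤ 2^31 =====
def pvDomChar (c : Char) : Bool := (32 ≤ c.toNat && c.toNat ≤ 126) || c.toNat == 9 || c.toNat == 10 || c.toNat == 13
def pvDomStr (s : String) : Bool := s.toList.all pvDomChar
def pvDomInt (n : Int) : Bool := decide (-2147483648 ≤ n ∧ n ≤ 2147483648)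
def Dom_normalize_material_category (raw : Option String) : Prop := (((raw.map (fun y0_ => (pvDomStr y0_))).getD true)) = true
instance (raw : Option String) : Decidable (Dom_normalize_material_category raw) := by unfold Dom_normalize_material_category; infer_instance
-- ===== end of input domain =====

-- B replaces A's ordered chain of per-keyword substring searches by a single sliding-window
-- scan of the string that looks each window up in one flat keyword table and keeps the
-- minimum-priority hit (alternative algorithm, same behaviour).


-- ===== PORT A =====
def normalize_material_category (raw : Option String) : String :=
  match raw with
  | none => "Unknown"
  | some s =>
    if s = "" then "Unknown"
    else
      let r := PySem.Str.lower (PySem.Str.strip s)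
      if ["wood", "wooden", "timber", "bamboo"].any (fun k => PySem.Str.isIn k r) then "Wood"
      else if ["concrete", "cement"].any (fun k => PySem.Str.isIn k r) then "Concrete"
      else if PySem.Str.isIn "glass" r then "Glass"
      else if ["metal", "steel", "iron", "aluminum", "aluminium", "brass"].any (fun k => PySem.Str.isIn k r) then "Metal"
      else if ["plastic", "acrylic", "vinyl"].any (fun k => PySem.Str.isIn k r) then "Plastic"
      else if ["fabric", "textile", "cloth", "leather"].any (fun k => PySem.Str.isIn k r) then "Textile"
      else if ["ceramic", "tile", "porcelain"].any (fun k => PySem.Str.isIn k r) then "Ceramic/Tile"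
      else if ["stone", "marble", "granite"].any (fun k => PySem.Str.isIn k r) then "Stone"
      else if ["paper", "cardboard"].any (fun k => PySem.Str.isIn k r) then "Paper"
      else "Other"

-- ===== PORT B =====
-- _KEYWORDS: flat keyword -> (priority, category) dictionary (Source B's literal, same order)
def pvKWPairs : List (String × (Int × String)) :=
  [("wood", (0, "Wood")), ("wooden", (0, "Wood")), ("timber", (0, "Wood")), ("bamboo", (0, "Wood")),
   ("concrete", (1, "Concrete")), ("cement", (1, "Concrete")),
   ("glass", (2, "Glass")),
   ("metal", (3, "Metal")), ("steel", (3, "Metal")), ("iron", (3, "Metal")),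
   ("aluminum", (3, "Metal")), ("aluminium", (3, "Metal")), ("brass", (3, "Metal")),
   ("plastic", (4, "Plastic")), ("acrylic", (4, "Plastic")), ("vinyl", (4, "Plastic")),
   ("fabric", (5, "Textile")), ("textile", (5, "Textile")), ("cloth", (5, "Textile")), ("leather", (5, "Textile")),
   ("ceramic", (6, "Ceramic/Tile")), ("tile", (6, "Ceramic/Tile")), ("porcelain", (6, "Ceramic/Tile")),
   ("stone", (7, "Stone")), ("marble", (7, "Stone")), ("granite", (7, "Stone")),
   ("paper", (8, "Paper")), ("cardboard", (8, "Paper"))]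

def pvKW : PySem.Dict String (Int × String) := PySem.Dict.ofList pvKWPairs

-- _LENS: the distinct keyword lengths
def pvLens : List Int := [4, 5, 6, 7, 8, 9]

def normalize_material_category_alt (raw : Option String) : String :=
  match raw with
  | none => "Unknown"
  | some s =>
    if s = "" then "Unknown"
    else
      let r := PySem.Str.lower (PySem.Str.strip s)
      -- for i in range(len(r)): for L in _LENS: hit = _KEYWORDS.get(r[i:i+L]); …
      let best := (PySem.List.pyRange 0 (PySem.Str.len r) 1).foldl (fun best i =>
        pvLens.foldl (fun best L =>
          match pvKW.get? (PySem.Str.slice r (some i) (some (i + L))) with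
          | none => best
          | some hit =>
            match best with
            | none => some hit
            | some c => if hit.1 < c.1 then some hit else best) best) none
      match best with
      | none => "Other"
      | some b => b.2

-- ===== PRECONDITION & SPEC =====
def Spec_normalize_material_category (raw : Option String) (out : String) : Prop := out = normalize_material_category_alt raw
instance (raw : Option String) (out : String) : Decidable (Spec_normalize_material_category raw out) := by unfold Spec_normalize_material_category; infer_instance

-- ===== CLAIM (what is proved, stated in full; the proofs are below) =====
def Claim_equal_normalize_material_category : Prop := ∀ (raw : Option String), Dom_normalize_material_category raw → Spec_normalize_material_category raw (normalize_material_category raw)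

-- ===== LEMMAS AND PROOFS =====

-- proof-side view of B's accumulator update, on an already-looked-up hit
def pvMinStep (b : Option (Int × String)) (v : Int × String) : Option (Int × String) :=
  match b with
  | none => some v
  | some c => if v.1 < c.1 then some v else some c

-- the list of dictionary hits B's scan encounters (Nat indices)
def pvOffers (rl : List Char) : List (Int × String) :=
  (List.range rl.length).flatMap (fun i =>
    ([4, 5, 6, 7, 8, 9] : List Nat).filterMap (fun L =>
      pvKW.get? (String.ofList ((rl.drop i).take L))))

-- the nine category values, in priority order
def pvVals : List (Int × String) :=
  [(0, "Wood"), (1, "Concrete"), (2, "Glass"), (3, "Metal"), (4, "Plastic"),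
   (5, "Textile"), (6, "Ceramic/Tile"), (7, "Stone"), (8, "Paper")]

lemma pvKW_get?_iff (w : String) (v : Int × String) :
    pvKW.get? w = some v ↔ (w, v) ∈ pvKWPairs := by
  have hnd : pvKW.keys.Nodup := by decide
  have hitems : pvKW.items = pvKWPairs := by decide
  rw [PySem.Dict.get?_eq_some_iff_mem_items _ _ _ hnd, hitems]

lemma pvSlice_eq (r : String) (i L : Nat) :
    PySem.Str.slice r (some (i : Int)) (some ((i : Int) + (L : Int))) =
      String.ofList ((r.toList.drop i).take L) := by
  simp [PySem.Str.slice, PySem.Chars.slice_eq_listSlice, PySem.List.slice_natCast_add]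

-- a filterMap-fold view of a loop that looks up and conditionally updates
lemma foldl_lookup_eq_filterMap {α : Type} (h : α → Option (Int × String)) :
    ∀ (xs : List α) (b : Option (Int × String)),
      xs.foldl (fun b x =>
        match h x with
        | none => b
        | some hit =>
          match b with
          | none => some hit
          | some c => if hit.1 < c.1 then some hit else b) b
      = (xs.filterMap h).foldl pvMinStep b := by
  intro xs
  induction xs with
  | nil => intro b; rfl
  | cons x t ih =>
    intro b
    simp only [List.foldl_cons, List.filterMap_cons]
    cases hx : h x with
    | none => simp [ih]
    | some hit =>
      cases b with
      | none => simp [ih, pvMinStep]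
      | some c =>
        by_cases hlt : hit.1 < c.1 <;> simp [ih, pvMinStep, hlt]

-- spec of the min-priority fold
lemma pvMinStep_fold_spec :
    ∀ (offers : List (Int × String)) (b : Option (Int × String)),
      match offers.foldl pvMinStep b with
      | none => offers = [] ∧ b = none
      | some v => (v ∈ offers ∨ b = some v) ∧ (∀ w ∈ offers, v.1 ≤ w.1) ∧
          (∀ c, b = some c → v.1 ≤ c.1) := by
  intro offers
  induction offers with
  | nil =>
    intro b
    cases b with
    | none => exact ⟨rfl, rfl⟩
    | some c =>
      refine ⟨Or.inr rfl, by simp, ?_⟩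
      intro c' hc'; cases hc'; exact le_refl _
  | cons a t ih =>
    intro b
    have H := ih (pvMinStep b a)
    simp only [List.foldl_cons]
    cases hres : (t.foldl pvMinStep (pvMinStep b a)) with
    | none =>
      rw [hres] at H
      exact absurd H.2 (by cases b <;> simp [pvMinStep] <;> split <;> simp)
    | some v =>
      rw [hres] at H
      obtain ⟨hmem, hle, hacc⟩ := H
      cases b with
      | none =>
        have hva : v.1 ≤ a.1 := hacc a rfl
        refine ⟨?_, ?_, ?_⟩
        · rcases hmem with h | h
          · exact Or.inl (List.mem_cons_of_mem _ h)
          · exact Or.inl (by simp [pvMinStep] at h; simp [h])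
        · intro w hw
          rcases List.mem_cons.mp hw with rfl | hw
          · exact hva
          · exact hle w hw
        · intro c hc; cases hc
      | some c =>
        by_cases hlt : a.1 < c.1
        · simp only [pvMinStep, hlt, if_pos] at hacc hmem
          have hva : v.1 ≤ a.1 := hacc a rfl
          refine ⟨?_, ?_, ?_⟩
          · rcases hmem with h | h
            · exact Or.inl (List.mem_cons_of_mem _ h)
            · exact Or.inl (by simp at h; simp [h])
          · intro w hw
            rcases List.mem_cons.mp hw with rfl | hw
            · exact hva
            · exact hle w hw
          · intro c' hc'; cases hc'; exact le_trans hva (le_of_lt hlt)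
        · simp only [pvMinStep, hlt, if_neg, not_false_iff] at hacc hmem
          have hvc : v.1 ≤ c.1 := hacc c rfl
          refine ⟨?_, ?_, ?_⟩
          · rcases hmem with h | h
            · exact Or.inl (List.mem_cons_of_mem _ h)
            · exact Or.inr h
          · intro w hw
            rcases List.mem_cons.mp hw with rfl | hw
            · exact le_trans hvc (not_lt.mp hlt)
            · exact hle w hw
          · intro c' hc'; cases hc'; exact hvc

-- every hit comes from the table, so its value is one of the nine category values
lemma pvOffers_sub (rl : List Char) : ∀ v ∈ pvOffers rl, v ∈ pvVals := by
  intro v hv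
  simp only [pvOffers, List.mem_flatMap, List.mem_filterMap] at hv
  obtain ⟨i, _, L, _, hget⟩ := hv
  have := (pvKW_get?_iff _ v).mp hget
  have hval : ∀ p ∈ pvKWPairs, p.2 ∈ pvVals := by decide
  exact hval _ this

-- presence of a value among the scan's hits = some keyword with that value occurs in rl
lemma pvKW_keys_fact : ∀ p ∈ pvKWPairs, p.1.toList ≠ [] ∧ p.1.toList.length ∈ ([4, 5, 6, 7, 8, 9] : List Nat) := by
  decide

lemma mem_pvOffers_iff (rl : List Char) (v : Int × String) :
    v ∈ pvOffers rl ↔ ∃ kw, (kw, v) ∈ pvKWPairs ∧ PySem.Chars.isIn kw.toList rl = true := by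
  constructor
  · intro hv
    simp only [pvOffers, List.mem_flatMap, List.mem_filterMap] at hv
    obtain ⟨i, _, L, _, hget⟩ := hv
    refine ⟨String.ofList ((rl.drop i).take L), (pvKW_get?_iff _ v).mp hget, ?_⟩
    rw [← PySem.Chars.exists_prefix_drop_iff_isIn]
    exact ⟨i, by rw [String.toList_ofList]; exact List.take_prefix _ _⟩
  · rintro ⟨kw, hmem, hin⟩
    have hlen : kw.toList ≠ [] ∧ kw.toList.length ∈ ([4, 5, 6, 7, 8, 9] : List Nat) :=
      pvKW_keys_fact (kw, v) hmem
    obtain ⟨j, hpre⟩ := (PySem.Chars.exists_prefix_drop_iff_isIn _ _).mpr hin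
    have hj : j < rl.length := by
      by_contra h
      rw [List.drop_eq_nil_of_le (le_of_not_gt h)] at hpre
      exact hlen.1 (List.prefix_nil.mp hpre)
    have hwin : (rl.drop j).take kw.toList.length = kw.toList :=
      (List.prefix_iff_eq_take.mp hpre).symm
    simp only [pvOffers, List.mem_flatMap, List.mem_filterMap]
    exact ⟨j, List.mem_range.mpr hj, kw.toList.length, hlen.2,
      by rw [hwin, String.ofList_toList]; exact (pvKW_get?_iff _ v).mpr hmem⟩

-- B's scan result when v is a present category value of minimal priority
lemma pvScan_result (rl : List Char) (v : Int × String) (hv : v ∈ pvVals)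
    (hin : v ∈ pvOffers rl) (hmin : ∀ w ∈ pvOffers rl, v.1 ≤ w.1) :
    (pvOffers rl).foldl pvMinStep none = some v := by
  have H := pvMinStep_fold_spec (pvOffers rl) none
  cases hres : ((pvOffers rl).foldl pvMinStep none) with
  | none => rw [hres] at H; rw [H.1] at hin; cases hin
  | some u =>
    rw [hres] at H
    obtain ⟨hmem, hle, _⟩ := H
    have hu : u ∈ pvOffers rl := by
      rcases hmem with h | h
      · exact h
      · cases h
    have h1 : u.1 ≤ v.1 := hle v hin
    have h2 : v.1 ≤ u.1 := hmin u hu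
    have heq : v.1 = u.1 := le_antisymm h2 h1
    have huv : u ∈ pvVals := pvOffers_sub rl u hu
    have hdet : ∀ a ∈ pvVals, ∀ b ∈ pvVals, a.1 = b.1 → a = b := by decide
    rw [hdet u huv v hv heq.symm]

-- when no keyword occurs, the scan finds nothing
lemma pvScan_empty (rl : List Char) (habs : ∀ v ∈ pvVals, v ∉ pvOffers rl) :
    (pvOffers rl).foldl pvMinStep none = none := by
  have hnil : pvOffers rl = [] := by
    rw [List.eq_nil_iff_forall_not_mem]
    intro v hv
    exact habs v (pvOffers_sub rl v hv) hv
  rw [hnil]; rfl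

-- presence of a category value among the hits = A's any-over-its-keyword-group test
lemma presence_iff (r : String) (v : Int × String) (group : List String)
    (hgroup : ∀ kw, (kw, v) ∈ pvKWPairs ↔ kw ∈ group) :
    (group.any (fun k => PySem.Str.isIn k r) = true) ↔ v ∈ pvOffers r.toList := by
  rw [mem_pvOffers_iff]
  simp only [List.any_eq_true, PySem.Str.isIn_eq]
  constructor
  · rintro ⟨k, hk, hin⟩; exact ⟨k, (hgroup k).mpr hk, hin⟩
  · rintro ⟨k, hk, hin⟩; exact ⟨k, (hgroup k).mp hk, hin⟩

-- B's port equals the pvMinStep fold over pvOffers, then "Other"/category selection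
lemma pvAlt_eq (s : String) (hs : ¬ s = "") :
    normalize_material_category_alt (some s) =
      (match (pvOffers (PySem.Str.lower (PySem.Str.strip s)).toList).foldl pvMinStep none with
       | none => "Other"
       | some b => b.2) := by
  unfold normalize_material_category_alt
  simp only [hs, if_neg, not_false_iff]
  generalize PySem.Str.lower (PySem.Str.strip s) = r
  have hfold :
      (PySem.List.pyRange 0 (PySem.Str.len r) 1).foldl (fun best i =>
        pvLens.foldl (fun best L =>
          match pvKW.get? (PySem.Str.slice r (some i) (some (i + L))) with
          | none => best
          | some hit =>
            match best with
            | none => some hit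
            | some c => if hit.1 < c.1 then some hit else best) best) none
      = (pvOffers r.toList).foldl pvMinStep none := by
    rw [PySem.Str.len_eq, PySem.List.pyRange_zero_natCast, List.foldl_map]
    unfold pvOffers
    rw [List.foldl_flatMap]
    apply PySem.List.foldl_congr_mem
    intro b i _
    have hLens : pvLens = List.map (fun L : Nat => (L : Int)) [4, 5, 6, 7, 8, 9] := by decide
    rw [hLens, List.foldl_map]
    rw [foldl_lookup_eq_filterMap
      (fun L : Nat => pvKW.get? (PySem.Str.slice r (some (i : Int)) (some ((i : Int) + (L : Int)))))]
    congr 1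
    apply List.filterMap_congr
    intro L _
    rw [pvSlice_eq]
  rw [hfold]

-- ===== VERDICT (by name: the statement is the Claim_ definition above) =====
theorem normalize_material_category_spec : Claim_equal_normalize_material_category := by
  intro raw _
  unfold Spec_normalize_material_category
  cases raw with
  | none => rfl
  | some s =>
    by_cases hs : s = ""
    · simp [normalize_material_category, normalize_material_category_alt, hs]
    · rw [pvAlt_eq s hs]
      unfold normalize_material_category
      simp only [hs, if_neg, not_false_iff]
      generalize PySem.Str.lower (PySem.Str.strip s) = r
      have e0 := presence_iff r (0, "Wood") ["wood", "wooden", "timber", "bamboo"]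
        (by intro kw; simp [pvKWPairs])
      have e1 := presence_iff r (1, "Concrete") ["concrete", "cement"]
        (by intro kw; simp [pvKWPairs])
      have e2 := presence_iff r (2, "Glass") ["glass"]
        (by intro kw; simp [pvKWPairs])
      have e3 := presence_iff r (3, "Metal") ["metal", "steel", "iron", "aluminum", "aluminium", "brass"]
        (by intro kw; simp [pvKWPairs])
      have e4 := presence_iff r (4, "Plastic") ["plastic", "acrylic", "vinyl"]
        (by intro kw; simp [pvKWPairs])
      have e5 := presence_iff r (5, "Textile") ["fabric", "textile", "cloth", "leather"]
        (by intro kw; simp [pvKWPairs])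
      have e6 := presence_iff r (6, "Ceramic/Tile") ["ceramic", "tile", "porcelain"]
        (by intro kw; simp [pvKWPairs])
      have e7 := presence_iff r (7, "Stone") ["stone", "marble", "granite"]
        (by intro kw; simp [pvKWPairs])
      have e8 := presence_iff r (8, "Paper") ["paper", "cardboard"]
        (by intro kw; simp [pvKWPairs])
      have e2' : (PySem.Str.isIn "glass" r = true) ↔ (2, "Glass") ∈ pvOffers r.toList := by
        rw [← e2]; simp
      -- pick: first present category value decides B's scan
      have pick : ∀ v ∈ pvVals, v ∈ pvOffers r.toList →
          (∀ w ∈ pvVals, w.1 < v.1 → w ∉ pvOffers r.toList) →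
          (pvOffers r.toList).foldl pvMinStep none = some v := by
        intro v hv hin habs
        refine pvScan_result r.toList v hv hin ?_
        intro w hw
        have hwv : w ∈ pvVals := pvOffers_sub r.toList w hw
        by_contra hlt
        exact absurd hw (habs w hwv (lt_of_not_ge hlt))
      by_cases h0 : (0, "Wood") ∈ pvOffers r.toList
      · rw [if_pos (e0.mpr h0),
          pick _ (by decide) h0 (by intro w hw hlt; simp only [pvVals, List.mem_cons, List.not_mem_nil, or_false] at hw; rcases hw with rfl|rfl|rfl|rfl|rfl|rfl|rfl|rfl|rfl <;> first | assumption | (norm_num at hlt))]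
      · rw [if_neg (fun h => h0 (e0.mp h))]
        by_cases h1 : (1, "Concrete") ∈ pvOffers r.toList
        · rw [if_pos (e1.mpr h1),
            pick _ (by decide) h1 (by intro w hw hlt; simp only [pvVals, List.mem_cons, List.not_mem_nil, or_false] at hw; rcases hw with rfl|rfl|rfl|rfl|rfl|rfl|rfl|rfl|rfl <;> first | assumption | (norm_num at hlt))]
        · rw [if_neg (fun h => h1 (e1.mp h))]
          by_cases h2 : (2, "Glass") ∈ pvOffers r.toList
          · rw [if_pos (e2'.mpr h2),
              pick _ (by decide) h2 (by intro w hw hlt; simp only [pvVals, List.mem_cons, List.not_mem_nil, or_false] at hw; rcases hw with rfl|rfl|rfl|rfl|rfl|rfl|rfl|rfl|rfl <;> first | assumption | (norm_num at hlt))]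
          · rw [if_neg (fun h => h2 (e2'.mp h))]
            by_cases h3 : (3, "Metal") ∈ pvOffers r.toList
            · rw [if_pos (e3.mpr h3),
                pick _ (by decide) h3 (by intro w hw hlt; simp only [pvVals, List.mem_cons, List.not_mem_nil, or_false] at hw; rcases hw with rfl|rfl|rfl|rfl|rfl|rfl|rfl|rfl|rfl <;> first | assumption | (norm_num at hlt))]
            · rw [if_neg (fun h => h3 (e3.mp h))]
              by_cases h4 : (4, "Plastic") ∈ pvOffers r.toList
              · rw [if_pos (e4.mpr h4),
                  pick _ (by decide) h4 (by intro w hw hlt; simp only [pvVals, List.mem_cons, List.not_mem_nil, or_false] at hw; rcases hw with rfl|rfl|rfl|rfl|rfl|rfl|rfl|rfl|rfl <;> first | assumption | (norm_num at hlt))]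
              · rw [if_neg (fun h => h4 (e4.mp h))]
                by_cases h5 : (5, "Textile") ∈ pvOffers r.toList
                · rw [if_pos (e5.mpr h5),
                    pick _ (by decide) h5 (by intro w hw hlt; simp only [pvVals, List.mem_cons, List.not_mem_nil, or_false] at hw; rcases hw with rfl|rfl|rfl|rfl|rfl|rfl|rfl|rfl|rfl <;> first | assumption | (norm_num at hlt))]
                · rw [if_neg (fun h => h5 (e5.mp h))]
                  by_cases h6 : (6, "Ceramic/Tile") ∈ pvOffers r.toList
                  · rw [if_pos (e6.mpr h6),
                      pick _ (by decide) h6 (by intro w hw hlt; simp only [pvVals, List.mem_cons, List.not_mem_nil, or_false] at hw; rcases hw with rfl|rfl|rfl|rfl|rfl|rfl|rfl|rfl|rfl <;> first | assumption | (norm_num at hlt))]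
                  · rw [if_neg (fun h => h6 (e6.mp h))]
                    by_cases h7 : (7, "Stone") ∈ pvOffers r.toList
                    · rw [if_pos (e7.mpr h7),
                        pick _ (by decide) h7 (by intro w hw hlt; simp only [pvVals, List.mem_cons, List.not_mem_nil, or_false] at hw; rcases hw with rfl|rfl|rfl|rfl|rfl|rfl|rfl|rfl|rfl <;> first | assumption | (norm_num at hlt))]
                    · rw [if_neg (fun h => h7 (e7.mp h))]
                      by_cases h8 : (8, "Paper") ∈ pvOffers r.toList
                      · rw [if_pos (e8.mpr h8),
                          pick _ (by decide) h8 (by intro w hw hlt; simp only [pvVals, List.mem_cons, List.not_mem_nil, or_false] at hw; rcases hw with rfl|rfl|rfl|rfl|rfl|rfl|rfl|rfl|rfl <;> first | assumption | (norm_num at hlt))]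
                      · rw [if_neg (fun h => h8 (e8.mp h))]
                        rw [pvScan_empty r.toList
                          (by intro v hv; simp only [pvVals, List.mem_cons, List.not_mem_nil, or_false] at hv; rcases hv with rfl|rfl|rfl|rfl|rfl|rfl|rfl|rfl|rfl <;> assumption)]
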